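-- pv_equiv track=rewrite | github.com/kmertkagan/numerical-analysis | linear system of equations/is_diagonal.py | Is_DiagonalDominant
-- ===== SOURCE A (Python) =====
-- def Is_DiagonalDominant(A: list[list[int]]) -> bool:
--     """
--     KKB matris yani 'kesin köşegen baskın' matris olup olmadığını kontrol ediyoruz. eğer kesin köşegensel matris ise True dönecek, değilse False.
--
--     Keyword arguments:
--
--     A: coefficient of unknown variable
--
--     an instance;
--
--     17$x_{1}$ + 5$x_{2}$ + 10$x_{3}$ = 15
--     8$x_{1}$ + 15$x_{2}$ + 2$x_{3}$ = 12
--     6$x_{1}$ + 2$x_{2}$ + 9$x_{3}$ = 7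
--
--     for those equations, A'll be
--
--     A = [[17, 5, 10], [8, 15, 2], [6, 2, 9]]
--
--     Return: True - False
--     """
--
--     length = len(A)
--     diagonal = 0
--     nondiagonal = 0
--
--     for i in range(length):
--         for j in range(length):
--             if i == j:
--                 diagonal += abs(A[i][j])
--             else:
--                 nondiagonal += abs(A[i][j])
--
--     return True if diagonal > nondiagonal else False
-- ===== SOURCE B (Python) =====
-- def Is_DiagonalDominant(A: list[list[int]]) -> bool:
--     n = len(A)
--     diagonal = sum(abs(A[i][i]) for i in range(n))
--     total = sum(abs(x) for row in A for x in row[:n])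
--     return 2 * diagonal > total
-- ===== Notes on version B (the rewrite author's own statement) =====
-- stated objective: simpler
-- what changed: Replaces the branching double index loop accumulating (diagonal, nondiagonal) with a diagonal-only pass plus a flat total-sum comprehension, deriving the nondiagonal part by subtraction (2*diagonal > total).
import Mathlib
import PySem

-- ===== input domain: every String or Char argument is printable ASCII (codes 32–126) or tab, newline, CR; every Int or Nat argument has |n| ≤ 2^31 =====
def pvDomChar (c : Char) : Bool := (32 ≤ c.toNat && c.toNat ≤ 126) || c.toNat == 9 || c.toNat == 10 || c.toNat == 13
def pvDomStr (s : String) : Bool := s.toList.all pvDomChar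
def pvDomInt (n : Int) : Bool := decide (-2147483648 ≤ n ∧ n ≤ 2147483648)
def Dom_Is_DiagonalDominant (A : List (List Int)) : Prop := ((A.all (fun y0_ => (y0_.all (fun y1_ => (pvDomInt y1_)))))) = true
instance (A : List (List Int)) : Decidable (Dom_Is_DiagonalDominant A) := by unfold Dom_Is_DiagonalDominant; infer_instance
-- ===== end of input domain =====

-- B replaces A's branching (diagonal, nondiagonal) double loop by a diagonal-only pass plus a
-- flat total sum, testing 2*diagonal > total; objective: simpler decomposition (same cost).


-- ===== PORT A =====
def Is_DiagonalDominant (A : List (List Int)) : Bool :=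
  let length : Int := (A.length : Int)
  let st :=
    (PySem.List.pyRange 0 length 1).foldl (fun st i =>
      (PySem.List.pyRange 0 length 1).foldl (fun (st : Int × Int) j =>
        if i == j then (st.1 + |PySem.List.pyGetD (PySem.List.pyGetD A i []) j 0|, st.2)
        else (st.1, st.2 + |PySem.List.pyGetD (PySem.List.pyGetD A i []) j 0|)) st)
      ((0 : Int), (0 : Int))
  if st.1 > st.2 then true else false

-- ===== PORT B =====
def Is_DiagonalDominant_alt (A : List (List Int)) : Bool :=
  let n : Int := (A.length : Int)
  let diagonal : Int :=
    ((PySem.List.pyRange 0 n 1).map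
      (fun i => |PySem.List.pyGetD (PySem.List.pyGetD A i []) i 0|)).sum
  let total : Int :=
    (A.flatMap (fun row => (PySem.List.slice row none (some n)).map (fun x => |x|))).sum
  decide (2 * diagonal > total)

-- ===== PRECONDITION & SPEC =====
-- Pre_ excludes exactly the inputs on which Python A raises IndexError: some row shorter than len(A).
def Pre_Is_DiagonalDominant (A : List (List Int)) : Prop :=
  ∀ row ∈ A, A.length ≤ row.length
instance (A : List (List Int)) : Decidable (Pre_Is_DiagonalDominant A) := by
  unfold Pre_Is_DiagonalDominant; infer_instance
def pvWitness_Is_DiagonalDominant : List (List Int) := [[17, 5, 10], [8, 15, 2], [6, 2, 9]]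

def Spec_Is_DiagonalDominant (A : List (List Int)) (out : Bool) : Prop := out = Is_DiagonalDominant_alt A
instance (A : List (List Int)) (out : Bool) : Decidable (Spec_Is_DiagonalDominant A out) := by unfold Spec_Is_DiagonalDominant; infer_instance

-- ===== CLAIM (what is proved, stated in full; the proofs are below) =====
def Claim_equal_Is_DiagonalDominant : Prop := ∀ (A : List (List Int)), Dom_Is_DiagonalDominant A → Pre_Is_DiagonalDominant A → Spec_Is_DiagonalDominant A (Is_DiagonalDominant A)

-- ===== LEMMAS AND PROOFS =====

-- A's inner loop over j adds |r[i]| to the first component (when i is in range) and the rest of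
-- the row's absolute sum to the second.
theorem pv_inner_fold (r : List Int) (i : Int) (k : Nat) :
    ∀ (a d nd : Int),
    (PySem.List.pyRange a (a + k) 1).foldl
      (fun (st : Int × Int) j =>
        if i == j then (st.1 + |PySem.List.pyGetD r j 0|, st.2)
        else (st.1, st.2 + |PySem.List.pyGetD r j 0|)) (d, nd)
    = (d + (if a ≤ i ∧ i < a + k then |PySem.List.pyGetD r i 0| else 0),
       nd + ((PySem.List.pyRange a (a + k) 1).map (fun j => |PySem.List.pyGetD r j 0|)).sum
          - (if a ≤ i ∧ i < a + k then |PySem.List.pyGetD r i 0| else 0)) := by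
  induction k with
  | zero =>
    intro a d nd
    rw [PySem.List.pyRange_one_eq_nil (by omega)]
    simp
    omega
  | succ k ih =>
    intro a d nd
    have hc : a + ((k + 1 : Nat) : Int) = (a + 1) + (k : Int) := by push_cast; ring
    rw [hc,
      show PySem.List.pyRange a ((a + 1) + (k : Int)) 1
          = a :: PySem.List.pyRange (a + 1) ((a + 1) + (k : Int)) 1 from
        PySem.List.pyRange_one_cons (by omega),
      List.foldl_cons, List.map_cons, List.sum_cons]
    by_cases hia : i = a
    · subst hia
      rw [if_pos (by simp), ih]
      have hT : i ≤ i ∧ i < i + 1 + (k : Int) := ⟨le_refl _, by omega⟩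
      have hF : ¬(i + 1 ≤ i ∧ i < i + 1 + (k : Int)) := by omega
      rw [if_pos hT, if_neg hF]
      simp only [Prod.mk.injEq] <;> first | trivial | (constructor <;> (first | trivial | ring))
    · rw [if_neg (by simp [hia]), ih]
      by_cases h2 : a + 1 ≤ i ∧ i < a + 1 + (k : Int)
      · rw [if_pos h2, if_pos ⟨by omega, h2.2⟩]
        simp only [Prod.mk.injEq] <;> first | trivial | (constructor <;> (first | trivial | ring))
      · rw [if_neg h2, if_neg (by rintro ⟨h3, h4⟩; exact h2 ⟨by omega, h4⟩)]
        simp only [Prod.mk.injEq] <;> first | trivial | (constructor <;> (first | trivial | ring))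

-- A's outer loop accumulates (diagonal sum, total sum − diagonal sum) over rows a..a+k−1.
theorem pv_outer_fold (A : List (List Int)) (n : Int) (k : Nat) :
    ∀ (a d nd : Int), 0 ≤ a → a + k ≤ n →
    (PySem.List.pyRange a (a + k) 1).foldl (fun st i =>
      (PySem.List.pyRange 0 n 1).foldl
        (fun (st : Int × Int) j =>
          if i == j then (st.1 + |PySem.List.pyGetD (PySem.List.pyGetD A i []) j 0|, st.2)
          else (st.1, st.2 + |PySem.List.pyGetD (PySem.List.pyGetD A i []) j 0|)) st) (d, nd)
    = (d + ((PySem.List.pyRange a (a + k) 1).map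
              (fun i => |PySem.List.pyGetD (PySem.List.pyGetD A i []) i 0|)).sum,
       nd + ((PySem.List.pyRange a (a + k) 1).map
              (fun i => ((PySem.List.pyRange 0 n 1).map
                  (fun j => |PySem.List.pyGetD (PySem.List.pyGetD A i []) j 0|)).sum)).sum
          - ((PySem.List.pyRange a (a + k) 1).map
              (fun i => |PySem.List.pyGetD (PySem.List.pyGetD A i []) i 0|)).sum) := by
  induction k with
  | zero =>
    intro a d nd ha hn
    rw [show PySem.List.pyRange a (a + ((0 : Nat) : Int)) 1 = [] from
      PySem.List.pyRange_one_eq_nil (by omega)]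
    simp
  | succ k ih =>
    intro a d nd ha hn
    have hcast : a + ((k + 1 : Nat) : Int) = (a + 1) + (k : Int) := by push_cast; ring
    rw [hcast] at hn ⊢
    rw [show PySem.List.pyRange a ((a + 1) + (k : Int)) 1
          = a :: PySem.List.pyRange (a + 1) ((a + 1) + (k : Int)) 1 from
        PySem.List.pyRange_one_cons (by omega)]
    simp only [List.foldl_cons, List.map_cons, List.sum_cons]
    have hn' : 0 ≤ n := by omega
    have hnn : (0 : Int) + ((n.toNat : Nat) : Int) = n := by omega
    have hinner := pv_inner_fold (PySem.List.pyGetD A a []) a n.toNat 0 d nd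
    rw [hnn] at hinner
    rw [hinner, if_pos (show 0 ≤ a ∧ a < n from ⟨ha, by omega⟩)]
    rw [ih (a + 1) _ _ (by omega) hn]
    simp only [Prod.mk.injEq] <;> first | trivial | (constructor <;> (first | trivial | ring))

-- sums of a flatMap row by row
theorem pv_sum_flatMap (A : List (List Int)) (f : List Int → List Int) :
    (A.flatMap f).sum = (A.map (fun r => (f r).sum)).sum := by
  induction A with
  | nil => simp
  | cons r A ih => simp [ih]

-- a row's absolute sum read by index over range(k) with default 0 equals the sum over take k.
theorem pv_row_abs (k : Nat) : ∀ (r : List Int),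
    ((List.range k).map (fun j => |r.getD j 0|)).sum = ((r.take k).map (fun x => |x|)).sum := by
  induction k with
  | zero => intro r; simp
  | succ k ih =>
    intro r
    rw [List.range_succ]
    simp only [List.map_append, List.sum_append, List.map_cons, List.map_nil, List.sum_cons,
      List.sum_nil, ih]
    by_cases hk : k < r.length
    · rw [List.getD_eq_getElem r 0 hk, List.map_take, List.map_take,
        List.sum_take_succ _ _ (by simpa using hk)]
      simp
    · rw [List.getD_eq_default r 0 (by omega)]
      rw [List.take_of_length_le (by omega), List.take_of_length_le (by omega)]
      simp

-- bridge: the pyRange/pyGetD row sum equals the take-based row sum (any row length).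
theorem pv_row_abs_int (n : Nat) (r : List Int) :
    ((PySem.List.pyRange 0 (n : Int) 1).map (fun j => |PySem.List.pyGetD r j 0|)).sum
      = ((r.take n).map (fun x => |x|)).sum := by
  rw [PySem.List.pyRange_one]
  have h1 : ((n : Int) - 0).toNat = n := by omega
  rw [h1, List.map_map]
  have h2 : ((fun j => |PySem.List.pyGetD r j 0|) ∘ fun k : Nat => (0 : Int) + k)
      = fun j : Nat => |r.getD j 0| := by
    funext j
    simp [PySem.List.pyGetD_natCast]
  rw [h2, pv_row_abs]

theorem Is_DiagonalDominant_eq_alt (A : List (List Int)) :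
    Is_DiagonalDominant A = Is_DiagonalDominant_alt A := by
  unfold Is_DiagonalDominant Is_DiagonalDominant_alt
  have hlen : (0 : Int) + ((A.length : Nat) : Int) = (A.length : Int) := by omega
  have houter := pv_outer_fold A (A.length : Int) A.length 0 0 0 (by omega) (by omega)
  rw [hlen] at houter
  simp only [houter]
  set D : Int := ((PySem.List.pyRange 0 (A.length : Int) 1).map
      (fun i => |PySem.List.pyGetD (PySem.List.pyGetD A i []) i 0|)).sum with hD
  set T : Int := ((PySem.List.pyRange 0 (A.length : Int) 1).map
      (fun i => ((PySem.List.pyRange 0 (A.length : Int) 1).map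
          (fun j => |PySem.List.pyGetD (PySem.List.pyGetD A i []) j 0|)).sum)).sum with hT
  have hmap : (fun i : Int => ((PySem.List.pyRange 0 (A.length : Int) 1).map
        (fun j => |PySem.List.pyGetD (PySem.List.pyGetD A i []) j 0|)).sum)
      = (fun row : List Int => ((row.take A.length).map (fun x => |x|)).sum) ∘
          (fun i : Int => PySem.List.pyGetD A i []) := by
    funext i
    exact pv_row_abs_int A.length (PySem.List.pyGetD A i [])
  have htot : (A.flatMap (fun row =>
      (PySem.List.slice row none (some (A.length : Int))).map (fun x => |x|))).sum = T := by
    rw [hT, hmap, ← List.map_map, PySem.List.map_pyGetD_pyRange_zero' A []]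
    rw [pv_sum_flatMap]
    congr 1
    apply List.map_congr_left
    intro row _
    rw [show PySem.List.slice row none (some (A.length : Int))
          = row.take ((A.length : Int)).toNat from PySem.List.slice_to row (by omega)]
    norm_num
  rw [htot]
  simp only [zero_add]
  by_cases h : D > T - D
  · rw [if_pos h, eq_comm, decide_eq_true_iff]
    omega
  · rw [if_neg h, eq_comm, decide_eq_false_iff_not]
    omega

-- ===== VERDICT (by name: the statement is the Claim_ definition above) =====
theorem Is_DiagonalDominant_spec : Claim_equal_Is_DiagonalDominant := by
  intro A _ _
  unfold Spec_Is_DiagonalDominant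
  exact Is_DiagonalDominant_eq_alt A
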